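-- pv_equiv track=rewrite | github.com/dieBaerigenBerchtesgadener/Intelligent-Subtitles | subtitle_generation.py | merge_and_clean_placeholders
-- ===== SOURCE A (Python) =====
-- def merge_and_clean_placeholders(words: list[str], placeholder: str) -> list[str]:
--     merged_words = []
--     for i, w in enumerate(words):
--         if w != placeholder:
--             if merged_words and merged_words[-1] == placeholder:
--                 merged_words[-1] = '•'  # Replace placeholder with a single dot
--             merged_words.append(w)
--         elif not merged_words or (i > 0 and words[i-1] != placeholder):
--             merged_words.append(w)
--
--     # Remove leading and trailing placeholders
--     while merged_words and merged_words[0] == placeholder: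
--         merged_words.pop(0)
--     while merged_words and merged_words[-1] == placeholder:
--         merged_words.pop()
--
--     return merged_words
-- ===== SOURCE B (Python) =====
-- def merge_and_clean_placeholders(words: list[str], placeholder: str) -> list[str]:
--     # Phase 1: collapse runs of the placeholder to a single occurrence.
--     collapsed = []
--     for w in words:
--         if w != placeholder or not collapsed or collapsed[-1] != placeholder:
--             collapsed.append(w)
--     # Phase 2: drop a trailing placeholder (covers the all-placeholder case too).
--     if collapsed and collapsed[-1] == placeholder:
--         collapsed.pop()
--     # Phase 3: map remaining placeholders (i.e. leading run) to the merge dot.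
--     return ['•' if w == placeholder else w for w in collapsed]
-- ===== Notes on version B (the rewrite author's own statement) =====
-- stated objective: alternative
-- what changed: A's single lookahead-and-mutate pass (indexing words[i-1] and rewriting merged[-1] in place) plus two trim loops is replaced by three separate phases: a run-collapse pass, one trailing pop, and a final map of placeholders to the dot.
import Mathlib
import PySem

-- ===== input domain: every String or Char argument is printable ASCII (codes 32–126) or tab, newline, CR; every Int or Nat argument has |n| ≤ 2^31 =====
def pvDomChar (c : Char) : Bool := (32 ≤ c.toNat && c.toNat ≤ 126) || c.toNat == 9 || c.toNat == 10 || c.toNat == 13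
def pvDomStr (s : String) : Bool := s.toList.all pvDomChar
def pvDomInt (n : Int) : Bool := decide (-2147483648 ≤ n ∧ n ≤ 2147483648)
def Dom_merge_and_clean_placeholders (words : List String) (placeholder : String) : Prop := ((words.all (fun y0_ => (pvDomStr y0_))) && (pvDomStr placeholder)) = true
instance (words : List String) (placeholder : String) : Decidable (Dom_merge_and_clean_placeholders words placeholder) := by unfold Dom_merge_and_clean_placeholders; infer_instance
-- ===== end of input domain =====

-- B replaces A's lookahead-and-mutate pass plus two trim loops by three separate
-- phases (run-collapse, one trailing pop, map placeholders to the dot); same cost,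
-- proved equal on the ASCII domain (where no word can equal the dot '•').


-- ===== PORT A =====
-- the body of A's for-loop (state: merged_words; iw = (i, w) from enumerate)
def pvStepA (words : List String) (placeholder : String) (merged : List String) (iw : Int × String) : List String :=
  if iw.2 ≠ placeholder then
    (if merged ≠ [] ∧ merged.getLast? = some placeholder then merged.dropLast ++ ["•"] else merged) ++ [iw.2]
  else if merged = [] ∨ (iw.1 > 0 ∧ (PySem.List.pyGet? words (iw.1 - 1)).any (fun prev => prev != placeholder) = true) then
    -- words[i-1] via pyGet?; the access is guarded by i > 0 so it never raises
    merged ++ [iw.2]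
  else merged

-- while merged and merged[0] == placeholder: merged.pop(0)
def pvTrimLead (xs : List String) (p : String) : List String :=
  match xs with
  | [] => []
  | x :: rest => if x = p then pvTrimLead rest p else x :: rest

-- while merged and merged[-1] == placeholder: merged.pop()
def pvTrimTrail (xs : List String) (p : String) : List String :=
  if _h : xs.getLast? = some p then pvTrimTrail xs.dropLast p else xs
termination_by xs.length
decreasing_by
  cases xs with
  | nil => simp at _h
  | cons a l => simp

def merge_and_clean_placeholders (words : List String) (placeholder : String) : List String :=
  let merged := (PySem.List.enumerate words).foldl (pvStepA words placeholder) []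
  pvTrimTrail (pvTrimLead merged placeholder) placeholder

-- ===== PORT B =====
-- phase 1 loop body: append unless this placeholder extends a placeholder run
def pvCollapseB (placeholder : String) (out : List String) (w : String) : List String :=
  if w ≠ placeholder ∨ out = [] ∨ out.getLast? ≠ some placeholder then out ++ [w] else out

def merge_and_clean_placeholders_alt (words : List String) (placeholder : String) : List String :=
  let collapsed := words.foldl (pvCollapseB placeholder) []
  let collapsed := if collapsed ≠ [] ∧ collapsed.getLast? = some placeholder then collapsed.dropLast else collapsed
  collapsed.map (fun w => if w = placeholder then "•" else w)

-- ===== PRECONDITION & SPEC =====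
def Spec_merge_and_clean_placeholders (words : List String) (placeholder : String) (out : List String) : Prop := out = merge_and_clean_placeholders_alt words placeholder
instance (words : List String) (placeholder : String) (out : List String) : Decidable (Spec_merge_and_clean_placeholders words placeholder out) := by unfold Spec_merge_and_clean_placeholders; infer_instance

-- ===== CLAIM (what is proved, stated in full; the proofs are below) =====
def Claim_equal_merge_and_clean_placeholders : Prop := ∀ (words : List String) (placeholder : String), Dom_merge_and_clean_placeholders words placeholder → Spec_merge_and_clean_placeholders words placeholder (merge_and_clean_placeholders words placeholder)

-- ===== LEMMAS AND PROOFS =====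
-- f: the final map of B
def pvBul (p w : String) : String := if w = p then "•" else w

-- invariant shape of A's merged_words in terms of B's collapsed list:
-- every placeholder is already a dot except a trailing one
def pvRep (p : String) (b : List String) : List String :=
  if b.getLast? = some p then b.dropLast.map (pvBul p) ++ [p] else b.map (pvBul p)

lemma pvBul_ne (p : String) (hP : p ≠ "•") (w : String) : pvBul p w ≠ p := by
  unfold pvBul; split
  · exact fun h => hP h.symm
  · assumption

lemma getLast?_map_ne (p : String) (hP : p ≠ "•") (b : List String) :
    (b.map (pvBul p)).getLast? ≠ some p := by
  rw [List.getLast?_map]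
  cases h : b.getLast? with
  | none => simp
  | some y => simp [Option.map]; exact pvBul_ne p hP y

lemma pvTrimTrail_eq (xs : List String) (p : String) :
    pvTrimTrail xs p = if xs.getLast? = some p then pvTrimTrail xs.dropLast p else xs := by
  rw [pvTrimTrail]
  by_cases h : xs.getLast? = some p <;> simp [h]

lemma pvTrimTrail_no (xs : List String) (p : String) (h : xs.getLast? ≠ some p) :
    pvTrimTrail xs p = xs := by
  rw [pvTrimTrail_eq, if_neg h]

lemma pvRep_nil (p : String) : pvRep p [] = [] := by simp [pvRep]

lemma pvRep_ne_nil (p : String) (b : List String) (hb : b ≠ []) : pvRep p b ≠ [] := by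
  unfold pvRep; split
  · simp
  · simpa using hb

lemma pyGet_prev (p : String) (taken rest : List String) (ht : taken ≠ []) :
    PySem.List.pyGet? (taken ++ rest) ((taken.length : Int) - 1) = some (taken.getLast ht) := by
  obtain ⟨t', x, hx⟩ := (List.eq_nil_or_concat taken).resolve_left ht
  subst hx
  have h2 : (((t'.concat x).length : Int) - 1) = ((t'.length : Nat) : Int) := by
    simp
  rw [h2, PySem.List.pyGet?_natCast]
  simp [List.concat_eq_append]

lemma pvStep_key (p : String) (hP : p ≠ "•") (words taken ws b : List String) (w : String)
    (hwords : words = taken ++ w :: ws)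
    (hb0 : b = [] ↔ taken = [])
    (hbl : b.getLast? = some p ↔ taken.getLast? = some p) :
    pvStepA words p (pvRep p b) ((taken.length : Int), w) = pvRep p (pvCollapseB p b w) := by
  by_cases hwp : w = p
  · subst hwp
    by_cases hbe : b = []
    · subst hbe
      have ht : taken = [] := hb0.mp rfl
      subst ht
      simp [pvStepA, pvCollapseB, pvRep]
    · have ht : taken ≠ [] := fun h => hbe (hb0.mpr h)
      have hget : PySem.List.pyGet? words ((taken.length : Int) - 1) = some (taken.getLast ht) := by
        rw [hwords]; exact pyGet_prev w taken (w :: ws) ht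
      have hkpos : (0 : Int) < (taken.length : Int) := by
        have := List.length_pos_of_ne_nil ht; exact_mod_cast this
      have h1 : pvRep w b ≠ [] := pvRep_ne_nil w b hbe
      by_cases hbp : b.getLast? = some w
      · -- previous word is the placeholder: both sides skip
        have htl : taken.getLast ht = w := by
          have h := hbl.mp hbp
          rw [List.getLast?_eq_some_getLast ht] at h
          exact Option.some.inj h
        unfold pvStepA pvCollapseB
        simp [hget, htl, h1, hbp, hbe]
      · -- previous word differs: both sides append the placeholder
        have htl : taken.getLast? ≠ some w := fun h => hbp (hbl.mpr h)
        have htlv : taken.getLast ht ≠ w := by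
          rw [List.getLast?_eq_some_getLast ht] at htl; simpa using htl
        have hrhs : pvRep w (b ++ [w]) = b.map (pvBul w) ++ [w] := by
          unfold pvRep
          rw [if_pos (by simp), List.dropLast_concat]
        have hrep : pvRep w b = b.map (pvBul w) := by
          unfold pvRep; rw [if_neg hbp]
        unfold pvStepA pvCollapseB
        simp [hget, htlv, hbp, hrhs, hrep]
        exact fun _ => ht
  · -- w is a real word: both sides append it (A first turning a trailing placeholder into the dot)
    have hcoll : pvCollapseB p b w = b ++ [w] := by
      unfold pvCollapseB; rw [if_pos (Or.inl hwp)]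
    have hrhs : pvRep p (b ++ [w]) = b.map (pvBul p) ++ [w] := by
      unfold pvRep
      rw [if_neg (by simp [hwp]), List.map_append]
      simp [pvBul, hwp]
    rw [hcoll, hrhs]
    by_cases hbp : b.getLast? = some p
    · have hbe : b ≠ [] := by intro e; subst e; simp at hbp
      have hrep : pvRep p b = b.dropLast.map (pvBul p) ++ [p] := by
        unfold pvRep; rw [if_pos hbp]
      have hbsplit : b.map (pvBul p) = b.dropLast.map (pvBul p) ++ ["•"] := by
        conv_lhs => rw [← List.dropLast_append_getLast hbe]
        have hg : b.getLast hbe = p := by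
          have h := hbp; rw [List.getLast?_eq_some_getLast hbe] at h
          exact (Option.some.injEq _ _).mp h
        simp [hg, pvBul]
      unfold pvStepA
      rw [if_pos (by simpa using hwp), if_pos (by simp [hrep])]
      rw [hrep, List.dropLast_concat, hbsplit]
    · have hrep : pvRep p b = b.map (pvBul p) := by
        unfold pvRep; rw [if_neg hbp]
      unfold pvStepA
      rw [if_pos (by simpa using hwp), if_neg, hrep]
      rw [hrep]
      intro hc
      exact getLast?_map_ne p hP b hc.2

lemma pvLoop (p : String) (hP : p ≠ "•") (words : List String) :
    ∀ (ws taken b : List String),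
      words = taken ++ ws →
      (b = [] ↔ taken = []) →
      (b.getLast? = some p ↔ taken.getLast? = some p) →
      (PySem.List.enumerate ws (taken.length : Int)).foldl (pvStepA words p) (pvRep p b)
        = pvRep p (ws.foldl (pvCollapseB p) b) := by
  intro ws
  induction ws with
  | nil => intro taken b _ _ _; simp [PySem.List.enumerate]
  | cons w ws ih =>
    intro taken b hwords hb0 hbl
    rw [PySem.List.enumerate_cons, List.foldl_cons, List.foldl_cons,
        pvStep_key p hP words taken ws b w hwords hb0 hbl]
    have hlen : (taken.length : Int) + 1 = (((taken ++ [w]).length : Nat) : Int) := by simp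
    rw [hlen]
    apply ih (taken ++ [w])
    · rw [hwords]; simp
    · have hne : pvCollapseB p b w ≠ [] := by
        unfold pvCollapseB; split
        · simp
        · rename_i hc
          push Not at hc
          exact hc.2.1
      simp [hne]
    · have hlast : ((pvCollapseB p b w).getLast? = some p) ↔ w = p := by
        unfold pvCollapseB; split
        · simp
        · rename_i hc
          push Not at hc
          simp [hc.2.2, hc.1]
      rw [hlast]
      simp

lemma pvTrimLead_cons_ne (x : String) (xs : List String) (p : String) (hx : x ≠ p) :
    pvTrimLead (x :: xs) p = x :: xs := by
  simp [pvTrimLead, hx]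

lemma pvFinal (p : String) (hP : p ≠ "•") (b : List String) :
    pvTrimTrail (pvTrimLead (pvRep p b) p) p
      = (if b ≠ [] ∧ b.getLast? = some p then b.dropLast else b).map (pvBul p) := by
  by_cases hbp : b.getLast? = some p
  · have hbe : b ≠ [] := by intro e; subst e; simp at hbp
    have hrep : pvRep p b = b.dropLast.map (pvBul p) ++ [p] := by
      unfold pvRep; rw [if_pos hbp]
    rw [hrep, if_pos ⟨hbe, hbp⟩]
    cases hM : b.dropLast.map (pvBul p) with
    | nil =>
      simp only [List.nil_append]
      rw [show pvTrimLead [p] p = [] by simp [pvTrimLead]]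
      rw [pvTrimTrail_no [] p (by simp)]
    | cons m M' =>
      have hm : m ≠ p := by
        have hmem : m ∈ b.dropLast.map (pvBul p) := by rw [hM]; simp
        obtain ⟨y, _, hy⟩ := List.mem_map.mp hmem
        rw [← hy]; exact pvBul_ne p hP y
      calc pvTrimTrail (pvTrimLead (m :: (M' ++ [p])) p) p
          = pvTrimTrail (m :: (M' ++ [p])) p := by
            rw [pvTrimLead_cons_ne _ _ _ hm]
        _ = pvTrimTrail (m :: M') p := by
            rw [pvTrimTrail_eq,
                if_pos (by rw [← List.cons_append, List.getLast?_append]; simp)]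
            rw [← List.cons_append, List.dropLast_concat]
        _ = m :: M' := by
            rw [← hM]
            exact pvTrimTrail_no _ p (getLast?_map_ne p hP b.dropLast)
  · have hrep : pvRep p b = b.map (pvBul p) := by
      unfold pvRep; rw [if_neg hbp]
    rw [hrep, if_neg (by intro h; exact hbp h.2)]
    cases hb : b with
    | nil => simp [pvTrimLead]; rw [pvTrimTrail_no [] p (by simp)]
    | cons x b' =>
      rw [List.map_cons, pvTrimLead_cons_ne _ _ p (pvBul_ne p hP x), ← List.map_cons]
      exact pvTrimTrail_no _ p (getLast?_map_ne p hP (x :: b'))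

-- ===== VERDICT (by name: the statement is the Claim_ definition above) =====
theorem merge_and_clean_placeholders_spec : Claim_equal_merge_and_clean_placeholders := by
  intro words p hdom
  have hP : p ≠ "•" := by
    intro e
    subst e
    unfold Dom_merge_and_clean_placeholders at hdom
    simp at hdom
    exact absurd hdom.2 (by decide)
  unfold Spec_merge_and_clean_placeholders merge_and_clean_placeholders merge_and_clean_placeholders_alt
  have hloop := pvLoop p hP words words [] [] (by simp) (by simp) (by simp)
  simp only [List.length_nil, Nat.cast_zero, pvRep_nil] at hloop
  rw [show PySem.List.enumerate words = PySem.List.enumerate words (0:Int) from rfl, hloop, pvFinal p hP]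
  rfl
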